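-- pv_equiv track=rewrite | github.com/nirg/Search_Engine | parser_module.py | sub_by_upper
-- ===== SOURCE A (Python) =====
-- def sub_by_upper(text):
--     """
--     cut long word to lst that the first word start with upper
--     :param text:long word
--     :return: lst  that the first word start with uppe
--     """
--     parseList=[]
--     tmp=[]
--     word=""
--     for i in range(len(text)):
--         if text[i].isupper():
--           tmp.append(i)
--     for i in range(len(tmp)-1):
--         word=text[tmp[i]:tmp[i+1]]
--         parseList.append(word.lower())
--     if(len(tmp)>0):
--         text=text[tmp[-1]:]
--         parseList.append(text.lower())
--     return parseList
-- ===== SOURCE B (Python) =====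
-- def sub_by_upper(text):
--     parseList = []
--     buf = None
--     for ch in text:
--         if ch.isupper():
--             if buf is not None:
--                 parseList.append(''.join(buf).lower())
--             buf = [ch]
--         elif buf is not None:
--             buf.append(ch)
--     if buf is not None:
--         parseList.append(''.join(buf).lower())
--     return parseList
-- ===== Notes on version B (the rewrite author's own statement) =====
-- stated objective: simpler
-- what changed: Replaced A's two-phase scheme (collect all uppercase indices, then a second loop slicing the string between consecutive indices) by a single streaming pass that maintains a current-segment buffer (None until the first uppercase letter) and flushes it lowercased at each uppercase letter and at the end.
import Mathlib
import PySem

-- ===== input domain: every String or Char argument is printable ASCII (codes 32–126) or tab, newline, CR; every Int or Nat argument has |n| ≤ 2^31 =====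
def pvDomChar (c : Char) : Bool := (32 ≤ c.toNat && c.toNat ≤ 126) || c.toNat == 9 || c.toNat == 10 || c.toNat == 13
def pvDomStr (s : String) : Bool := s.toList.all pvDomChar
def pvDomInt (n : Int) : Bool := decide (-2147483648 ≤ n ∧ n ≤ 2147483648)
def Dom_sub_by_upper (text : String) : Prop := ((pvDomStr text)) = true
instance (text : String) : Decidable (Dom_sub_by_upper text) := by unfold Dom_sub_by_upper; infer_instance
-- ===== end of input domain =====

-- B replaces A's two-phase scheme (collect uppercase indices, then slice between consecutive
-- indices) by a single streaming pass with a current-segment buffer; same return value, simpler.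

-- ===== PORT A =====
-- Literal transliteration of A: first loop collects indices of uppercase chars; second loop
-- slices text between consecutive indices; final slice from the last index.
def sub_by_upper (text : String) : List String :=
  let cs := text.toList
  let tmp : List Nat := (List.range cs.length).foldl
    (fun tmp i => if PySem.Chars.isupper (cs.getD i ' ') then tmp ++ [i] else tmp) []
  let parseList : List String := (List.range (tmp.length - 1)).foldl
    (fun acc i => acc ++ [String.ofList (PySem.Chars.lower
        (PySem.List.slice cs (some ((tmp.getD i 0 : Nat) : Int))
                             (some ((tmp.getD (i+1) 0 : Nat) : Int))))]) []
  if tmp.length > 0 then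
    parseList ++ [String.ofList (PySem.Chars.lower
        (PySem.List.slice cs (some (((PySem.List.pyGet? tmp (-1)).getD 0 : Nat) : Int)) none))]
  else parseList

-- ===== PORT B =====
-- one step of B's loop: flush the buffer at an uppercase char, else extend a live buffer
def sbStep (acc : List String × Option (List Char)) (c : Char) :
    List String × Option (List Char) :=
  if PySem.Chars.isupper c then
    ((match acc.2 with
      | some buf => acc.1 ++ [String.ofList (PySem.Chars.lower buf)]
      | none => acc.1), some [c])
  else
    (acc.1, acc.2.map (fun buf => buf ++ [c]))

def sub_by_upper_alt (text : String) : List String :=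
  match text.toList.foldl sbStep ([], none) with
  | (res, some buf) => res ++ [String.ofList (PySem.Chars.lower buf)]
  | (res, none) => res

-- ===== PRECONDITION & SPEC =====
def Spec_sub_by_upper (text : String) (out : List String) : Prop := out = sub_by_upper_alt text
instance (text : String) (out : List String) : Decidable (Spec_sub_by_upper text out) := by
  unfold Spec_sub_by_upper; infer_instance

-- ===== CLAIM (what is proved, stated in full; the proofs are below) =====
def Claim_equal_sub_by_upper : Prop :=
  ∀ (text : String), Dom_sub_by_upper text → Spec_sub_by_upper text (sub_by_upper text)

-- ===== LEMMAS AND PROOFS =====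

-- indices of uppercase characters, recursively
def upIdx : List Char → List Nat
  | [] => []
  | c :: cs =>
    if PySem.Chars.isupper c then 0 :: (upIdx cs).map (· + 1) else (upIdx cs).map (· + 1)

-- segments of cs cut at a list of positions (A's second phase, recursively)
def chop : List Nat → List Char → List String
  | [], _ => []
  | [i], cs => [String.ofList (PySem.Chars.lower (cs.drop i))]
  | i :: j :: r, cs =>
    String.ofList (PySem.Chars.lower ((cs.drop i).take (j - i))) :: chop (j :: r) cs

-- B's remaining output given a live buffer (B's loop, recursively)
def segAll : List Char → List Char → List String
  | buf, [] => [String.ofList (PySem.Chars.lower buf)]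
  | buf, c :: cs =>
    if PySem.Chars.isupper c then
      String.ofList (PySem.Chars.lower buf) :: segAll [c] cs
    else segAll (buf ++ [c]) cs

def finishB : List String × Option (List Char) → List String
  | (res, some buf) => res ++ [String.ofList (PySem.Chars.lower buf)]
  | (res, none) => res

lemma map_shift (u : List Nat) (a b : Nat) :
    (u.map (· + a)).map (· + b) = u.map (· + (a + b)) := by
  simp [List.map_map, Function.comp, Nat.add_assoc]

-- A's first loop computes upIdx (generalized over accumulator and offset)
lemma idx_loop (cs : List Char) (acc : List Nat) (ofs : Nat) :
    (List.range cs.length).foldl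
      (fun a k => if PySem.Chars.isupper (cs.getD k ' ') then a ++ [k + ofs] else a) acc
    = acc ++ (upIdx cs).map (· + ofs) := by
  induction cs generalizing acc ofs with
  | nil => simp [upIdx]
  | cons c cs ih =>
    rw [List.length_cons, List.range_succ_eq_map, List.foldl_cons, List.foldl_map]
    have h1 : (fun (a : List Nat) (k : Nat) =>
        if PySem.Chars.isupper ((c :: cs).getD (Nat.succ k) ' ') then a ++ [Nat.succ k + ofs] else a)
        = fun a k => if PySem.Chars.isupper (cs.getD k ' ') then a ++ [k + (ofs + 1)] else a := by
      funext a k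
      simp only [Nat.succ_eq_add_one, List.getD_cons_succ]
      have hk : k + 1 + ofs = k + (ofs + 1) := by omega
      rw [hk]
    rw [h1, ih]
    by_cases hc : PySem.Chars.isupper c
    · simp [upIdx, hc, map_shift, List.getD_cons_zero, Nat.add_comm 1 ofs]
    · simp [upIdx, hc, map_shift, List.getD_cons_zero, Nat.add_comm 1 ofs]

-- A's second phase (both loops together) computes chop
lemma parse_loop (t : List Nat) (cs : List Char) (acc : List String) :
    ((List.range (t.length - 1)).foldl
      (fun acc i => acc ++ [String.ofList (PySem.Chars.lower
          (PySem.List.slice cs (some ((t.getD i 0 : Nat) : Int))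
                               (some ((t.getD (i+1) 0 : Nat) : Int))))]) acc)
    ++ (if t.length > 0 then
          [String.ofList (PySem.Chars.lower
            (PySem.List.slice cs (some (((PySem.List.pyGet? t (-1)).getD 0 : Nat) : Int)) none))]
        else [])
    = acc ++ chop t cs := by
  induction t generalizing acc with
  | nil => simp [chop]
  | cons i t ih =>
    cases t with
    | nil =>
      simp [chop, PySem.List.pyGet?_neg_one, PySem.List.slice_from_natCast]
    | cons j r =>
      have hlen : (i :: j :: r).length - 1 = r.length + 1 := by simp
      rw [hlen, List.range_succ_eq_map, List.foldl_cons, List.foldl_map]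
      have h1 : (fun (a : List String) (k : Nat) => a ++ [String.ofList (PySem.Chars.lower
            (PySem.List.slice cs (some (((i :: j :: r).getD (Nat.succ k) 0 : Nat) : Int))
                                 (some (((i :: j :: r).getD (Nat.succ k + 1) 0 : Nat) : Int))))])
          = fun a k => a ++ [String.ofList (PySem.Chars.lower
            (PySem.List.slice cs (some (((j :: r).getD k 0 : Nat) : Int))
                                 (some (((j :: r).getD (k+1) 0 : Nat) : Int))))] := by
        funext a k
        simp only [Nat.succ_eq_add_one, List.getD_cons_succ]
      have hlen2 : List.range r.length = List.range ((j :: r).length - 1) := by simp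
      rw [h1, hlen2]
      have hget : PySem.List.pyGet? (i :: j :: r) (-1) = PySem.List.pyGet? (j :: r) (-1) := by
        rw [PySem.List.pyGet?_neg_one, PySem.List.pyGet?_neg_one, List.getLast?_cons_cons]
      rw [hget, if_pos (by simp : (i :: j :: r).length > 0)]
      have ih' := ih (acc ++ [String.ofList (PySem.Chars.lower
          (PySem.List.slice cs (some (((i :: j :: r).getD 0 0 : Nat) : Int))
                               (some (((i :: j :: r).getD (0+1) 0 : Nat) : Int))))])
      rw [if_pos (by simp : (j :: r).length > 0)] at ih'
      rw [ih']
      simp [chop, List.getD_cons_zero, List.getD_cons_succ, PySem.List.slice_natCast]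

lemma drop_shift {alpha : Type} (pre cs : List alpha) (i : Nat) :
    (pre ++ cs).drop (i + pre.length) = cs.drop i := by
  rw [List.drop_append]
  simp [List.drop_of_length_le (Nat.le_add_left pre.length i)]

-- chop ignores a common prefix once all positions are shifted past it
lemma chop_drop (t : List Nat) (pre cs : List Char) :
    chop (t.map (· + pre.length)) (pre ++ cs) = chop t cs := by
  induction t with
  | nil => simp [chop]
  | cons i t ih =>
    cases t with
    | nil =>
      simp only [List.map_cons, List.map_nil, chop]
      rw [drop_shift]
    | cons j r =>
      simp only [List.map_cons, chop] at *
      rw [ih, drop_shift]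
      have hsub : j + pre.length - (i + pre.length) = j - i := by omega
      rw [hsub]

-- B's segment loop computes the chop of the shifted index list
lemma segAll_eq_chop (cs buf : List Char) :
    segAll buf cs = chop (0 :: (upIdx cs).map (· + buf.length)) (buf ++ cs) := by
  induction cs generalizing buf with
  | nil => simp [segAll, upIdx, chop]
  | cons c cs ih =>
    by_cases hc : PySem.Chars.isupper c
    · have h0 : (upIdx (c :: cs)).map (· + buf.length)
          = buf.length :: (upIdx cs).map (· + (1 + buf.length)) := by
        simp [upIdx, hc, map_shift]
      rw [h0]
      have hL : segAll buf (c :: cs)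
          = String.ofList (PySem.Chars.lower buf) :: segAll [c] cs := by
        simp [segAll, hc]
      rw [hL]
      have hsplit : chop (0 :: buf.length :: (upIdx cs).map (· + (1 + buf.length)))
            (buf ++ c :: cs)
          = String.ofList (PySem.Chars.lower ((buf ++ c :: cs).take buf.length))
            :: chop ((0 :: (upIdx cs).map (· + 1)).map (· + buf.length)) (buf ++ c :: cs) := by
        simp [chop, map_shift, Nat.add_comm 1 buf.length]
      rw [hsplit, List.take_left, chop_drop (0 :: (upIdx cs).map (· + 1)) buf (c :: cs)]
      have : chop (0 :: (upIdx cs).map (· + 1)) (c :: cs)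
          = chop (0 :: (upIdx cs).map (· + [c].length)) ([c] ++ cs) := by simp
      rw [this, ← ih]
    · have h0 : (upIdx (c :: cs)).map (· + buf.length)
          = (upIdx cs).map (· + (buf ++ [c]).length) := by
        simp [upIdx, hc, map_shift, Nat.add_comm 1 buf.length]
      rw [h0]
      have hL : segAll buf (c :: cs) = segAll (buf ++ [c]) cs := by
        simp [segAll, hc]
      rw [hL, ih (buf ++ [c])]
      simp

-- B's loop with a live buffer
lemma foldl_some (cs : List Char) (res : List String) (buf : List Char) :
    finishB (cs.foldl sbStep (res, some buf)) = res ++ segAll buf cs := by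
  induction cs generalizing res buf with
  | nil => simp [finishB, segAll]
  | cons c cs ih =>
    by_cases hc : PySem.Chars.isupper c
    · have hstep : sbStep (res, some buf) c
          = (res ++ [String.ofList (PySem.Chars.lower buf)], some [c]) := by
        simp [sbStep, hc]
      rw [List.foldl_cons, hstep, ih]
      simp [segAll, hc]
    · have hstep : sbStep (res, some buf) c = (res, some (buf ++ [c])) := by
        simp [sbStep, hc]
      rw [List.foldl_cons, hstep, ih]
      simp [segAll, hc]

-- B's loop before the first uppercase character
lemma foldl_none (cs : List Char) (res : List String) :
    finishB (cs.foldl sbStep (res, none)) = res ++ chop (upIdx cs) cs := by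
  induction cs generalizing res with
  | nil => simp [finishB, upIdx, chop]
  | cons c cs ih =>
    by_cases hc : PySem.Chars.isupper c
    · have hstep : sbStep (res, none) c = (res, some [c]) := by simp [sbStep, hc]
      rw [List.foldl_cons, hstep, foldl_some, segAll_eq_chop]
      simp [upIdx, hc]
    · have hstep : sbStep (res, none) c = (res, none) := by simp [sbStep, hc]
      rw [List.foldl_cons, hstep, ih]
      have : chop (upIdx (c :: cs)) (c :: cs)
          = chop ((upIdx cs).map (· + [c].length)) ([c] ++ cs) := by
        simp [upIdx, hc]
      rw [this, chop_drop]

lemma A_eq_chop (text : String) :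
    sub_by_upper text = chop (upIdx text.toList) text.toList := by
  unfold sub_by_upper
  have hidx : (List.range text.toList.length).foldl
      (fun a k => if PySem.Chars.isupper (text.toList.getD k ' ') then a ++ [k] else a) []
      = upIdx text.toList := by
    have := idx_loop text.toList [] 0
    simpa using this
  simp only [hidx]
  have := parse_loop (upIdx text.toList) text.toList []
  simp only [List.nil_append] at this
  rw [← this]
  by_cases h : (upIdx text.toList).length > 0 <;> simp [h]

lemma B_eq_chop (text : String) :
    sub_by_upper_alt text = chop (upIdx text.toList) text.toList := by
  have := foldl_none text.toList []
  simp only [List.nil_append] at this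
  rw [← this]
  unfold sub_by_upper_alt finishB
  rcases text.toList.foldl sbStep ([], none) with ⟨res, _ | buf⟩ <;> rfl

-- ===== VERDICT (by name: the statement is the Claim_ definition above) =====
theorem sub_by_upper_spec : Claim_equal_sub_by_upper := by
  intro text _
  show sub_by_upper text = sub_by_upper_alt text
  rw [A_eq_chop, B_eq_chop]
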